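-- pv_equiv track=rewrite | github.com/K0rz3n/session-maintainer | helper/url_normalizer.py | _filter_pairs_in_keep_order
-- ===== SOURCE A (Python) =====
-- from typing import Any, Dict, List, Optional, Tuple
--
-- def _filter_pairs_in_keep_order(
--     pairs: List[Tuple[str, str]],
--     keep_keys: List[str],
-- ) -> List[Tuple[str, str]]:
--     """
--     按 keep_keys 的顺序输出；对每个 key，保留其在原 URL 中出现的所有项（维持该键的出现顺序）。
--     """
--     out: List[Tuple[str, str]] = []
--     for k in keep_keys:
--         for kk, vv in pairs:
--             if kk == k:
--                 out.append((kk, vv))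
--     return out
-- ===== SOURCE B (Python) =====
-- def _filter_pairs_in_keep_order(pairs, keep_keys):
--     groups = {}
--     for k, v in pairs:
--         groups.setdefault(k, []).append(v)
--     out = []
--     for k in keep_keys:
--         out.extend((k, v) for v in groups.get(k, []))
--     return out
-- ===== Notes on version B (the rewrite author's own statement) =====
-- stated objective: faster
-- what changed: Replaces the nested scan of pairs per keep key with a single grouping pass building a dict key -> list of values, then one lookup per keep key.
import Mathlib
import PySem

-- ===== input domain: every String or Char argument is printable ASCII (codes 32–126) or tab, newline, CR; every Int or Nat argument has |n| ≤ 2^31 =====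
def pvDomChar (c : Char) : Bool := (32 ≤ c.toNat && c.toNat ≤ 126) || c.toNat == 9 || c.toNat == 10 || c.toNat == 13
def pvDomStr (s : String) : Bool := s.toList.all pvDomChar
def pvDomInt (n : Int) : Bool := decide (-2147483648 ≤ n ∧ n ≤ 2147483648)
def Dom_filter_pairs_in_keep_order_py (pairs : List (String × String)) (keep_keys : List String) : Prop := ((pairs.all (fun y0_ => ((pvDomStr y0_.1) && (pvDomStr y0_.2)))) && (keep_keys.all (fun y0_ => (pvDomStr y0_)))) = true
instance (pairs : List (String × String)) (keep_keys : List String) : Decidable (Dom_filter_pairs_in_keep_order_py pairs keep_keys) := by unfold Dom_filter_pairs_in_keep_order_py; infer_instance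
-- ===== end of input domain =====

-- B groups pairs once into a dict key -> list of values, then does one dict lookup
-- per keep key, instead of A's rescan of all pairs for every keep key.

-- ===== PORT A =====
def filter_pairs_in_keep_order_py (pairs : List (String × String)) (keep_keys : List String) : List (String × String) :=
  keep_keys.foldl (fun out k =>
    pairs.foldl (fun out p => if p.1 == k then out ++ [p] else out) out) []

-- ===== PORT B =====
def filter_pairs_in_keep_order_py_alt (pairs : List (String × String)) (keep_keys : List String) : List (String × String) :=
  let groups : PySem.Dict String (List String) :=
    pairs.foldl (fun d p => d.modify p.1 [] (· ++ [p.2])) PySem.Dict.empty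
  keep_keys.foldl (fun out k => out ++ (groups.getD k []).map (fun v => (k, v))) []

-- ===== PRECONDITION & SPEC =====
def Spec_filter_pairs_in_keep_order_py (pairs : List (String × String)) (keep_keys : List String) (out : List (String × String)) : Prop := out = filter_pairs_in_keep_order_py_alt pairs keep_keys
instance (pairs : List (String × String)) (keep_keys : List String) (out : List (String × String)) : Decidable (Spec_filter_pairs_in_keep_order_py pairs keep_keys out) := by unfold Spec_filter_pairs_in_keep_order_py; infer_instance

-- ===== CLAIM (what is proved, stated in full; the proofs are below) =====
def Claim_equal_filter_pairs_in_keep_order_py : Prop := ∀ (pairs : List (String × String)) (keep_keys : List String), Dom_filter_pairs_in_keep_order_py pairs keep_keys → Spec_filter_pairs_in_keep_order_py pairs keep_keys (filter_pairs_in_keep_order_py pairs keep_keys)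

-- ===== LEMMAS AND PROOFS =====

-- For each key k, the values stored for k in B's grouping dict are exactly the
-- second components of the pairs whose first component equals k, re-tagged with k:
-- and since p.1 == k means p.1 = k, the re-tagged list is the filtered list itself.
theorem pv_filter_map_tag (pairs : List (String × String)) (k : String) :
    (pairs.filter (fun p => p.1 == k)).map (((fun v => (k, v)) : String → String × String) ∘ (fun p : String × String => p.2))
      = pairs.filter (fun p => p.1 == k) := by
  induction pairs with
  | nil => simp
  | cons p rest ih =>
    by_cases h : p.1 == k
    · have hk : p.1 = k := by simpa using h
      simp only [List.filter_cons, h, if_pos, List.map_cons, Function.comp_apply, ih]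
      rw [← hk]
    · simp [h, ih]

theorem pv_both_eq (pairs : List (String × String)) (keep_keys : List String)
    (acc : List (String × String)) :
    keep_keys.foldl (fun out k =>
        pairs.foldl (fun out p => if p.1 == k then out ++ [p] else out) out) acc
    = keep_keys.foldl (fun out k =>
        out ++ (((pairs.foldl (fun d p => d.modify p.1 [] (· ++ [p.2]))
            PySem.Dict.empty).getD k []).map (fun v => (k, v)))) acc := by
  induction keep_keys generalizing acc with
  | nil => rfl
  | cons k rest ih =>
    simp only [List.foldl_cons]
    rw [ih]
    congr 1
    rw [PySem.List.foldl_append_if_eq_filter,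
        PySem.Dict.getD_foldl_modify_append]
    simp only [PySem.Dict.getD_empty, List.nil_append, List.map_map]
    rw [pv_filter_map_tag]

-- ===== VERDICT (by name: the statement is the Claim_ definition above) =====
theorem filter_pairs_in_keep_order_py_spec : Claim_equal_filter_pairs_in_keep_order_py := by
  intro pairs keep_keys _
  unfold Spec_filter_pairs_in_keep_order_py filter_pairs_in_keep_order_py filter_pairs_in_keep_order_py_alt
  exact pv_both_eq pairs keep_keys []
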